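-- pv_equiv track=rewrite | github.com/Nini0la/autodidacticon | tests/conftest.py | int_to_ulid
-- ===== SOURCE A (Python) =====
-- def int_to_ulid(n: int) -> str:
--     alphabet = "0123456789ABCDEFGHJKMNPQRSTVWXYZ"
--     if n < 0:
--         raise ValueError("ULID counter must be non-negative")
--     out = []
--     value = n
--     while value:
--         value, rem = divmod(value, 32)
--         out.append(alphabet[rem])
--     encoded = "".join(reversed(out)) or "0"
--     return ("0" * 26 + encoded)[-26:]
-- ===== SOURCE B (Python) =====
-- def int_to_ulid(n: int) -> str:
--     alphabet = "0123456789ABCDEFGHJKMNPQRSTVWXYZ"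
--     if n < 0:
--         raise ValueError("ULID counter must be non-negative")
--     return "".join(alphabet[(n >> (5 * i)) & 31] for i in range(25, -1, -1))
-- ===== Notes on version B (the rewrite author's own statement) =====
-- stated objective: simpler
-- what changed: Replaces the while/divmod digit loop plus reverse, left-pad and negative-slice truncation by a single fixed-width pass that extracts each output base-32 digit directly with a shift and mask.
import Mathlib
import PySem

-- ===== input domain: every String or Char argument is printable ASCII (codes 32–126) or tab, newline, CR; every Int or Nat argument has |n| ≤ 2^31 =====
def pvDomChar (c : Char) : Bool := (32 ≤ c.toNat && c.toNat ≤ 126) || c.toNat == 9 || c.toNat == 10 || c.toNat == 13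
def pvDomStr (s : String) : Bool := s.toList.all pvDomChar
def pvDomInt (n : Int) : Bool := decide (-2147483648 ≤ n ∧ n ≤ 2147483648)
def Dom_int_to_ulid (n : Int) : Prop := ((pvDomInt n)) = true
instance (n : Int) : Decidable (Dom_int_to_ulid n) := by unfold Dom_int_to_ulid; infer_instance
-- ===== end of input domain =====

-- B computes the 26 base-32 digits directly by shift-and-mask over fixed positions instead of
-- A's while/divmod digit loop + reverse + left-pad + [-26:] slice (objective: simpler).

-- ===== PORT A =====
def ulidAlphabet : List Char := "0123456789ABCDEFGHJKMNPQRSTVWXYZ".toList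

-- while value: value, rem = divmod(value, 32); out.append(alphabet[rem])
-- (value is non-negative when the loop runs — the negativity guard already fired — so it is
--  carried as a Nat; Python's divmod on non-negative ints is exactly Nat division/remainder)
def int_to_ulid_loop (value : Nat) (out : List Char) : List Char :=
  if value = 0 then out
  else int_to_ulid_loop (value / 32) (out ++ [ulidAlphabet.getD (value % 32) '0'])
termination_by value
decreasing_by exact Nat.div_lt_self (Nat.pos_of_ne_zero (by assumption)) (by norm_num)

def int_to_ulid (n : Int) : String :=
  if n < 0 then ""  -- Python raises ValueError here; excluded by Pre_int_to_ulid
  else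
    let out := int_to_ulid_loop n.toNat []
    -- "".join(reversed(out)) or "0"
    let encoded := if out.reverse = [] then ['0'] else out.reverse
    -- ("0" * 26 + encoded)[-26:]
    String.mk (PySem.List.slice (List.replicate 26 '0' ++ encoded) (some (-26)) none)

-- ===== PORT B =====
def int_to_ulid_alt (n : Int) : String :=
  if n < 0 then ""  -- Python raises ValueError here; excluded by Pre_int_to_ulid
  else
    -- "".join(alphabet[(n >> (5 * i)) & 31] for i in range(25, -1, -1));
    -- n is non-negative here, so the Python shift/mask is exactly the Nat shift/mask on n.toNat
    String.mk ((PySem.List.pyRange 25 (-1) (-1)).map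
      (fun i => ulidAlphabet.getD ((n.toNat >>> (5 * i.toNat)) &&& 31) '0'))

-- ===== PRECONDITION & SPEC =====
-- Pre_ excludes exactly the negative n, on which Python A (and B) raise ValueError.
def Pre_int_to_ulid (n : Int) : Prop := 0 ≤ n
instance (n : Int) : Decidable (Pre_int_to_ulid n) := by unfold Pre_int_to_ulid; infer_instance
def pvWitness_int_to_ulid : Int := (1)

def Spec_int_to_ulid (n : Int) (out : String) : Prop := out = int_to_ulid_alt n
instance (n : Int) (out : String) : Decidable (Spec_int_to_ulid n out) := by unfold Spec_int_to_ulid; infer_instance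

-- ===== CLAIM (what is proved, stated in full; the proofs are below) =====
def Claim_equal_int_to_ulid : Prop := ∀ (n : Int), Dom_int_to_ulid n → Pre_int_to_ulid n → Spec_int_to_ulid n (int_to_ulid n)

-- ===== LEMMAS AND PROOFS =====

-- A's digits, little-endian (the contents of 'out' after the loop).
def digitsLE (v : Nat) : List Char :=
  if v = 0 then [] else ulidAlphabet.getD (v % 32) '0' :: digitsLE (v / 32)
termination_by v
decreasing_by exact Nat.div_lt_self (Nat.pos_of_ne_zero (by assumption)) (by norm_num)

-- the fixed-width big-endian digit list, recursively
def fw : Nat → Nat → List Char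
  | 0, _ => []
  | c+1, m => fw c (m / 32) ++ [ulidAlphabet.getD (m % 32) '0']

theorem loop_eq : ∀ (v : Nat) (out : List Char), int_to_ulid_loop v out = out ++ digitsLE v := by
  intro v
  induction v using Nat.strong_induction_on with
  | _ v ih =>
    intro out
    rw [int_to_ulid_loop, digitsLE]
    by_cases h : v = 0
    · simp [h]
    · simp only [h, if_false]
      rw [ih (v / 32) (Nat.div_lt_self (Nat.pos_of_ne_zero h) (by norm_num))]
      simp

theorem fw_zero (c : Nat) : fw c 0 = List.replicate c '0' := by
  induction c with
  | zero => rfl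
  | succ c ih =>
    rw [fw, ih, List.replicate_succ']
    norm_num
    rfl

theorem key : ∀ (c : Nat), ∀ m, m < 32 ^ c →
    (List.replicate c '0' ++ (digitsLE m).reverse).drop (digitsLE m).length = fw c m := by
  intro c
  induction c with
  | zero =>
    intro m hm
    have h0 : m = 0 := by omega
    subst h0
    rw [digitsLE]
    simp [fw]
  | succ c ih =>
    intro m hm
    by_cases h : m = 0
    · subst h
      rw [digitsLE]
      simp [fw_zero]
    · rw [digitsLE]
      simp only [h, if_false, List.reverse_cons, List.length_cons, List.replicate_succ,
        List.cons_append, List.drop_succ_cons, ← List.append_assoc]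
      rw [List.drop_append_of_le_length (by simp)]
      have hdiv : m / 32 < 32 ^ c := by
        have : (32:Nat) ^ (c+1) = 32 ^ c * 32 := pow_succ 32 c
        exact Nat.div_lt_of_lt_mul (by omega)
      rw [ih (m / 32) hdiv]
      rfl

theorem elem (m j : Nat) : (m >>> (5 * j)) &&& 31 = m / 32 ^ j % 32 := by
  have h1 : (31:Nat) = 2 ^ 5 - 1 := by norm_num
  rw [h1, Nat.and_two_pow_sub_one_eq_mod, Nat.shiftRight_eq_div_pow, pow_mul]
  norm_num

theorem fw_front (c : Nat) : ∀ m, fw (c+1) m = ulidAlphabet.getD (m / 32 ^ c % 32) '0' :: fw c m := by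
  induction c with
  | zero => intro m; simp [fw]
  | succ c ih =>
    intro m
    rw [show c+1+1 = (c+1)+1 from rfl, fw, ih]
    rw [show fw (c+1) m = fw c (m / 32) ++ [ulidAlphabet.getD (m % 32) '0'] from rfl]
    simp [Nat.div_div_eq_div_mul, pow_succ, Nat.mul_comm]

theorem fw_front' (c : Nat) (m : Nat) :
    fw (c+1) m = ulidAlphabet.getD ((m >>> (5 * c)) &&& 31) '0' :: fw c m := by
  rw [fw_front, elem]

theorem alt_eq (m : Nat) :
    (PySem.List.pyRange 25 (-1) (-1)).map
      (fun i => ulidAlphabet.getD ((m >>> (5 * i.toNat)) &&& 31) '0') = fw 26 m := by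
  have hr : PySem.List.pyRange 25 (-1) (-1) =
      [25, 24, 23, 22, 21, 20, 19, 18, 17, 16, 15, 14, 13, 12, 11, 10, 9, 8, 7, 6, 5, 4, 3, 2, 1, 0] := by
    decide
  rw [hr]
  simp only [List.map]
  rw [show (26:Nat) = 25+1 from rfl, fw_front', show (25:Nat) = 24+1 from rfl, fw_front', show (24:Nat) = 23+1 from rfl, fw_front', show (23:Nat) = 22+1 from rfl, fw_front', show (22:Nat) = 21+1 from rfl, fw_front', show (21:Nat) = 20+1 from rfl, fw_front', show (20:Nat) = 19+1 from rfl, fw_front', show (19:Nat) = 18+1 from rfl, fw_front', show (18:Nat) = 17+1 from rfl, fw_front', show (17:Nat) = 16+1 from rfl, fw_front', show (16:Nat) = 15+1 from rfl, fw_front', show (15:Nat) = 14+1 from rfl, fw_front', show (14:Nat) = 13+1 from rfl, fw_front', show (13:Nat) = 12+1 from rfl, fw_front', show (12:Nat) = 11+1 from rfl, fw_front', show (11:Nat) = 10+1 from rfl, fw_front', show (10:Nat) = 9+1 from rfl, fw_front', show (9:Nat) = 8+1 from rfl, fw_front', show (8:Nat) = 7+1 from rfl, fw_front', show (7:Nat)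 = 6+1 from rfl, fw_front', show (6:Nat) = 5+1 from rfl, fw_front', show (5:Nat) = 4+1 from rfl, fw_front', show (4:Nat) = 3+1 from rfl, fw_front', show (3:Nat) = 2+1 from rfl, fw_front', show (2:Nat) = 1+1 from rfl, fw_front', show (1:Nat) = 0+1 from rfl, fw_front']
  rfl

-- ===== VERDICT (by name: the statement is the Claim_ definition above) =====
theorem int_to_ulid_spec : Claim_equal_int_to_ulid := by
  intro n hdom hpre
  unfold Spec_int_to_ulid int_to_ulid int_to_ulid_alt
  rw [if_neg (not_lt.mpr hpre), if_neg (not_lt.mpr hpre)]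
  simp only [loop_eq, List.nil_append]
  have hm : n.toNat < 32 ^ 26 := by
    simp only [Dom_int_to_ulid, pvDomInt, decide_eq_true_eq] at hdom
    have hle : n.toNat ≤ 2147483648 := by omega
    exact lt_of_le_of_lt hle (by norm_num)
  by_cases h0 : n.toNat = 0
  · rw [h0, digitsLE]
    exact congrArg String.mk (by decide)
  · have hne : digitsLE n.toNat ≠ [] := by
      rw [digitsLE]; simp [h0]
    rw [if_neg (by simpa using hne)]
    rw [PySem.List.slice_from_neg_ofNat _ 26 (by norm_num)]
    have hlen : (List.replicate 26 '0' ++ (digitsLE n.toNat).reverse).length - 26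
        = (digitsLE n.toNat).length := by simp
    rw [hlen, key 26 n.toNat hm, alt_eq]
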